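-- pv_equiv track=rewrite | github.com/yuguonet/QuantDinger | real_roundtrip.py | compare_category
-- ===== SOURCE A (Python) =====
-- from typing import Any, Dict, List, Set, Tuple
--
-- def compare_category(original: Dict, generated_yaml: Dict) -> Tuple[bool, str]:
--     """对比分类。允许语义相近的分类。"""
--     orig_cat = original.get('category', '')
--     gen_cat = generated_yaml.get('category', '')
--
--     if orig_cat == gen_cat:
--         return True, f"完全匹配: {orig_cat}"
--
--     # 语义相近的分类组
--     cat_groups = [
--         {'trend', 'framework'},      # 趋势类和框架类都涉及趋势判断
--         {'reversal', 'volatility'},  # 反转和波动率相关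
--         {'pattern', 'trend'},        # 形态和趋势
--     ]
--     for group in cat_groups:
--         if orig_cat in group and gen_cat in group:
--             return True, f"语义相近: {orig_cat} ≈ {gen_cat}"
--
--     return False, f"原={orig_cat}, 生成={gen_cat}"
-- ===== SOURCE B (Python) =====
-- # Group membership encoded as bitmasks: each category maps to the set of groups
-- # it belongs to; two distinct categories are semantically close iff their
-- # group-membership masks intersect (nonzero bitwise AND).
-- _GROUP_MASK = {
--     'trend':      0b101,  # groups 0 ({trend,framework}) and 2 ({pattern,trend})
--     'framework':  0b001,  # group 0
--     'reversal':   0b010,  # group 1 ({reversal,volatility})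
--     'volatility': 0b010,  # group 1
--     'pattern':    0b100,  # group 2
-- }
--
-- def compare_category(original, generated_yaml):
--     orig_cat = original.get('category', '')
--     gen_cat = generated_yaml.get('category', '')
--
--     if orig_cat == gen_cat:
--         return True, f"完全匹配: {orig_cat}"
--
--     if _GROUP_MASK.get(orig_cat, 0) & _GROUP_MASK.get(gen_cat, 0):
--         return True, f"语义相近: {orig_cat} ≈ {gen_cat}"
--
--     return False, f"原={orig_cat}, 生成={gen_cat}"
-- ===== Notes on version B (the rewrite author's own statement) =====
-- stated objective: alternative
-- what changed: Replaces A's scan over group sets with dual membership tests by a per-category group-membership bitmask table: two distinct categories are close iff the bitwise AND of their masks is nonzero.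
import Mathlib
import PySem

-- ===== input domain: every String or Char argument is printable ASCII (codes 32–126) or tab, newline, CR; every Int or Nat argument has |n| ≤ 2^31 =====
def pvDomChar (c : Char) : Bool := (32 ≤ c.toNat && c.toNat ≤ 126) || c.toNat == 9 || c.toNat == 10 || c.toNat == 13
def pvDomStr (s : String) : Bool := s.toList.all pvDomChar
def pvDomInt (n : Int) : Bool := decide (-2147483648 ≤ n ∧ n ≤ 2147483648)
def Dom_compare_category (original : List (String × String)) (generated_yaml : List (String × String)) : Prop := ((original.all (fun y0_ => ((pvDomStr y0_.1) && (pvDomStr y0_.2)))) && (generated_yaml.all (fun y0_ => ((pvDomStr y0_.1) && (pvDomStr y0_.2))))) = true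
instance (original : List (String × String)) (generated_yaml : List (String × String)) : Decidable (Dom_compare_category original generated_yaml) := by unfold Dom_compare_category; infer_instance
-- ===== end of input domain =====

-- B replaces A's loop over group sets (dual membership per group) by a per-category
-- group-membership bitmask table: distinct categories are close iff the bitwise AND
-- of their masks is nonzero (objective: alternative).

-- ===== PORT A =====
-- the three semantic groups of A, as Python sets
def pvCatGroups : List (PySem.Set String) :=
  [PySem.Set.ofList ["trend", "framework"],
   PySem.Set.ofList ["reversal", "volatility"],
   PySem.Set.ofList ["pattern", "trend"]]

-- the 'for group in cat_groups' loop with its early return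
def pvFindGroup (o g : String) : List (PySem.Set String) → Bool × String
  | [] => (false, "原=" ++ o ++ ", 生成=" ++ g)
  | grp :: rest =>
      if grp.contains o && grp.contains g then (true, "语义相近: " ++ o ++ " ≈ " ++ g)
      else pvFindGroup o g rest

def compare_category (original : List (String × String)) (generated_yaml : List (String × String)) : Bool × String :=
  let orig_cat := PySem.Dict.getD (PySem.Dict.mk original) "category" ""
  let gen_cat := PySem.Dict.getD (PySem.Dict.mk generated_yaml) "category" ""
  if orig_cat == gen_cat then (true, "完全匹配: " ++ orig_cat)
  else pvFindGroup orig_cat gen_cat pvCatGroups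

-- ===== PORT B =====
-- the module-level bitmask table _GROUP_MASK of Source B (a Python dict)
def pvGroupMask : PySem.Dict String Int :=
  PySem.Dict.mk
    [("trend", 5), ("framework", 1), ("reversal", 2), ("volatility", 2), ("pattern", 4)]

def compare_category_alt (original : List (String × String)) (generated_yaml : List (String × String)) : Bool × String :=
  let orig_cat := PySem.Dict.getD (PySem.Dict.mk original) "category" ""
  let gen_cat := PySem.Dict.getD (PySem.Dict.mk generated_yaml) "category" ""
  if orig_cat == gen_cat then (true, "完全匹配: " ++ orig_cat)
  -- Python truthiness of the int '_GROUP_MASK.get(o,0) & _GROUP_MASK.get(g,0)': nonzero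
  else if Int.land (PySem.Dict.getD pvGroupMask orig_cat 0) (PySem.Dict.getD pvGroupMask gen_cat 0) ≠ 0 then
    (true, "语义相近: " ++ orig_cat ++ " ≈ " ++ gen_cat)
  else (false, "原=" ++ orig_cat ++ ", 生成=" ++ gen_cat)

-- ===== PRECONDITION & SPEC =====
def Spec_compare_category (original : List (String × String)) (generated_yaml : List (String × String)) (out : Bool × String) : Prop := out = compare_category_alt original generated_yaml
instance (original : List (String × String)) (generated_yaml : List (String × String)) (out : Bool × String) : Decidable (Spec_compare_category original generated_yaml out) := by unfold Spec_compare_category; infer_instance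

-- ===== CLAIM =====
def Claim_equal_compare_category : Prop := ∀ (original : List (String × String)) (generated_yaml : List (String × String)), Dom_compare_category original generated_yaml → Spec_compare_category original generated_yaml (compare_category original generated_yaml)

-- ===== LEMMAS AND PROOFS =====

-- the dict lookup in B's mask table, characterised as an if-chain
theorem pvMask (s : String) :
    PySem.Dict.getD pvGroupMask s 0 =
      (if s = "trend" then 5 else if s = "framework" then 1 else if s = "reversal" then 2
       else if s = "volatility" then 2 else if s = "pattern" then 4 else 0) := by
  by_cases a : s = "trend"
  · subst a; rfl
  by_cases b : s = "framework"
  · simp [b]; rfl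
  by_cases c : s = "reversal"
  · simp [c]; rfl
  by_cases d : s = "volatility"
  · simp [d]; rfl
  by_cases e : s = "pattern"
  · simp [e]; rfl
  simp [pvGroupMask, PySem.Dict.getD, PySem.Dict.get?, PySem.Dict.mk, List.find?,
    show ("trend" == s) = false from by simp [Ne.symm a],
    show ("framework" == s) = false from by simp [Ne.symm b],
    show ("reversal" == s) = false from by simp [Ne.symm c],
    show ("volatility" == s) = false from by simp [Ne.symm d],
    show ("pattern" == s) = false from by simp [Ne.symm e], a, b, c, d, e]

-- with distinct categories, the group scan and the bitmask test agree
theorem pvCore (o g : String) (h : o ≠ g) :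
    pvFindGroup o g pvCatGroups =
      (if Int.land (PySem.Dict.getD pvGroupMask o 0) (PySem.Dict.getD pvGroupMask g 0) ≠ 0 then
        (true, "语义相近: " ++ o ++ " ≈ " ++ g)
      else (false, "原=" ++ o ++ ", 生成=" ++ g)) := by
  rw [pvMask o, pvMask g]
  split_ifs <;>
    simp_all [pvFindGroup, pvCatGroups, PySem.Set.ofList, PySem.Set.contains, PySem.Set.add,
      show Int.land 5 5 = 5 from rfl, show Int.land 5 1 = 1 from rfl,
      show Int.land 5 2 = 0 from rfl, show Int.land 5 4 = 4 from rfl,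
      show Int.land 5 0 = 0 from rfl, show Int.land 1 5 = 1 from rfl,
      show Int.land 1 1 = 1 from rfl, show Int.land 1 2 = 0 from rfl,
      show Int.land 1 4 = 0 from rfl, show Int.land 1 0 = 0 from rfl,
      show Int.land 2 5 = 0 from rfl, show Int.land 2 1 = 0 from rfl,
      show Int.land 2 2 = 2 from rfl, show Int.land 2 4 = 0 from rfl,
      show Int.land 2 0 = 0 from rfl, show Int.land 4 5 = 4 from rfl,
      show Int.land 4 1 = 0 from rfl, show Int.land 4 2 = 0 from rfl,
      show Int.land 4 4 = 4 from rfl, show Int.land 4 0 = 0 from rfl,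
      show Int.land 0 5 = 0 from rfl, show Int.land 0 1 = 0 from rfl,
      show Int.land 0 2 = 0 from rfl, show Int.land 0 4 = 0 from rfl,
      show Int.land 0 0 = 0 from rfl]

-- ===== VERDICT =====
theorem compare_category_spec : Claim_equal_compare_category := by
  intro original generated_yaml _
  unfold Spec_compare_category compare_category compare_category_alt
  set o := PySem.Dict.getD (PySem.Dict.mk original) "category" ""
  set g := PySem.Dict.getD (PySem.Dict.mk generated_yaml) "category" ""
  by_cases h : o = g
  · simp [h]
  · simp only [beq_iff_eq, if_neg h]
    exact pvCore o g h
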